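-- pv_equiv track=rewrite | github.com/m-ghosal/toa-projects | teleporters.py | solve
-- ===== SOURCE A (Python) =====
-- def solve(N, K, M, teleporters, edges):
--     g1 = Graph(N)
--     g1.graph = edges
--     min_cost_tunnels = g1.kruskal_algo()
--
--     g2 = Graph(N + 1)
--     for node, weight in teleporters:
--         edges.append([node - 1, N, weight])
--     g2.graph = edges
--     min_cost_with_teleporters = g2.kruskal_algo()
--
--     if min_cost_tunnels < min_cost_with_teleporters:
--         return min_cost_tunnels
--     else:
--         return min_cost_with_teleporters
--
-- class Graph:
--     def __init__(self, vertices):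
--         self.V = vertices
--         self.graph = []
--     '''def add_edge(self, u, v, w):
--         self.graph.append([u, v, w])'''
--
--     # Search function
--
--     def find(self, parent, i):
--         if parent[i] == i:
--             return i
--         return self.find(parent, parent[i])
--
--     def apply_union(self, parent, rank, x, y):
--         xroot = self.find(parent, x)
--         yroot = self.find(parent, y)
--         if rank[xroot] < rank[yroot]:
--             parent[xroot] = yroot
--         elif rank[xroot] > rank[yroot]:
--             parent[yroot] = xroot
--         else:
--             parent[yroot] = xroot
--             rank[xroot] += 1
--
-- #  Applying Kruskal algorithm
--     def kruskal_algo(self):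
--         result = []
--         i, e = 0, 0
--         self.graph = sorted(self.graph, key=lambda item: item[2])
--         parent = []
--         rank = []
--         for node in range(self.V):
--             parent.append(node)
--             rank.append(0)
--         while e < self.V - 1:
--             u, v, w = self.graph[i]
--             i = i + 1
--             x = self.find(parent, u)
--             y = self.find(parent, v)
--             if x != y:
--                 e = e + 1
--                 result.append([u, v, w])
--                 self.apply_union(parent, rank, x, y)
--         min_cost = 0
--         for u, v, weight in result:
--             min_cost += weight
--         return min_cost
-- ===== SOURCE B (Python) =====
-- def _mst_cost(V, rows):
--     # label-merging Kruskal variant: component labels instead of a union-find forest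
--     if V <= 1:
--         return 0  # fewer than two vertices: nothing to connect
--     comp = list(range(V))
--     total = 0
--     for u, v, w in sorted(rows, key=lambda t: t[2]):
--         cu, cv = comp[u], comp[v]
--         if cu != cv:
--             total += w
--             comp = [cu if c == cv else c for c in comp]
--     return total
--
--
-- def solve(N, K, M, teleporters, edges):
--     cost_tunnels = _mst_cost(N, edges)
--     for node, weight in teleporters:
--         edges.append([node - 1, N, weight])   # same in-place append as the original
--     cost_with_teleporters = _mst_cost(N + 1, edges)
--     return min(cost_tunnels, cost_with_teleporters)
-- ===== Notes on version B (the rewrite author's own statement) =====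
-- stated objective: alternative
-- what changed: Replaces the class-based Kruskal with recursive union-find (parent/rank arrays, recursive find, union by rank, result edge list summed afterwards, early loop exit) by a flat label-merging Kruskal: a component-label array rewritten wholesale on each accepted edge of the sorted list, summing weights directly, with a V<=1 base case and no union-find, recursion or early exit; the in-place append of teleporter rows to `edges` is preserved.
-- outside the precondition, e.g. on solve(1, 1, 1, [[1, 2]], [[-1, 0, 5]]): A returns 0, B returns 0; on solve(2, 0, 0, [[1, 1]], [[0, 1, 1], [5, 5, 5]]): A returns 1, B raises IndexError
import Mathlib
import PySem

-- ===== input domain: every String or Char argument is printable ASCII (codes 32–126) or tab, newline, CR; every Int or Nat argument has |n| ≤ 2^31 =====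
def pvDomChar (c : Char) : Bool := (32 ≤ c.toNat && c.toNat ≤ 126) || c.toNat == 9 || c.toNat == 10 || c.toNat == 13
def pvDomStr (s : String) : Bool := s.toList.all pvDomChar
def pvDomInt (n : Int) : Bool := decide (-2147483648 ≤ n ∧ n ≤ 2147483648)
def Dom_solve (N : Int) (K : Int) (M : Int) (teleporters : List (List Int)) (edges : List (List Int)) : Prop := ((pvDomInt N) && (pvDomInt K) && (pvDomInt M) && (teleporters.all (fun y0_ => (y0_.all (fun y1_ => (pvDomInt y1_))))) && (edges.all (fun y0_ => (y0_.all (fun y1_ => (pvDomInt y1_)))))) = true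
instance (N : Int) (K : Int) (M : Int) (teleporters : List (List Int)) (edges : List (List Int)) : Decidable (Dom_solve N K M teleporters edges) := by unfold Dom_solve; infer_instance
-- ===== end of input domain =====

-- B replaces A's recursive union-find Kruskal (parent/rank arrays, result list, early exit)
-- by a label-merging Kruskal variant: an array of component labels, relabelled wholesale on
-- each accepted edge, summing weights directly (objective: alternative, not claimed faster).
-- Both A and B append the teleporter rows to the caller's `edges` list in place; the theorems
-- below are about the return value (the mutation is identical in A and B).

-- shared shorthand for Python's xs[i] with a (never-used-inside-Pre) default
def pg (l : List Int) (i : Int) : Int := PySem.List.pyGetD l i 0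

-- ===== PORT A =====
-- Graph.find: recursive root chase; fuel bounds the recursion (ample inside Pre_)
def findA (parent : List Int) (i : Int) : Nat → Int
  | 0 => i
  | n + 1 => if pg parent i = i then i else findA parent (pg parent i) n

-- Graph.apply_union: union by rank, returns the updated (parent, rank)
def unionA (parent rank : List Int) (x y : Int) (F : Nat) : List Int × List Int :=
  let xroot := findA parent x F
  let yroot := findA parent y F
  if pg rank xroot < pg rank yroot then
    (PySem.List.pySetD parent xroot yroot, rank)
  else if pg rank yroot < pg rank xroot then
    (PySem.List.pySetD parent yroot xroot, rank)
  else
    (PySem.List.pySetD parent yroot xroot, PySem.List.pySetD rank xroot (pg rank xroot + 1))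

-- the `while e < self.V - 1` loop of kruskal_algo (i steps through the sorted list);
-- on the IndexError branch (list exhausted, outside Pre_) it returns the partial result
def kruskalGo (V : Int) (F : Nat) (parent rank : List Int) (e : Int) (res : List (List Int)) :
    List (List Int) → List (List Int)
  | [] => res
  | row :: rest =>
    if e < V - 1 then
      let u := pg row 0
      let v := pg row 1
      let w := pg row 2
      let x := findA parent u F
      let y := findA parent v F
      if x ≠ y then
        let pr := unionA parent rank x y F
        kruskalGo V F pr.1 pr.2 (e + 1) (res ++ [[u, v, w]]) rest
      else kruskalGo V F parent rank e res rest
    else res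

-- Graph.kruskal_algo
def kruskalA (V : Int) (g : List (List Int)) : Int :=
  let sg := PySem.List.sorted g (fun row => pg row 2) false
  let parent := PySem.List.pyRange 0 V 1
  let rank := parent.map (fun _ => (0 : Int))
  let result := kruskalGo V (parent.length + sg.length + 1) parent rank 0 [] sg
  result.foldl (fun acc row => acc + pg row 2) 0

def solve (N : Int) (K : Int) (M : Int) (teleporters : List (List Int)) (edges : List (List Int)) : Int :=
  let min_cost_tunnels := kruskalA N edges
  let edges2 := edges ++ teleporters.map (fun t => [pg t 0 - 1, N, pg t 1])
  let min_cost_with_teleporters := kruskalA (N + 1) edges2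
  if min_cost_tunnels < min_cost_with_teleporters then min_cost_tunnels else min_cost_with_teleporters

-- ===== PORT B =====
-- _mst_cost's loop: component labels, relabel cv → cu on every accepted edge
def mstGo (comp : List Int) (total : Int) : List (List Int) → Int
  | [] => total
  | row :: rest =>
    let cu := pg comp (pg row 0)
    let cv := pg comp (pg row 1)
    if cu ≠ cv then
      mstGo (comp.map (fun c => if c = cv then cu else c)) (total + pg row 2) rest
    else mstGo comp total rest

-- _mst_cost (base case: fewer than two vertices need no edges)
def mstB (V : Int) (g : List (List Int)) : Int :=
  if V ≤ 1 then 0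
  else mstGo (PySem.List.pyRange 0 V 1) 0 (PySem.List.sorted g (fun row => pg row 2) false)

def solve_alt (N : Int) (K : Int) (M : Int) (teleporters : List (List Int)) (edges : List (List Int)) : Int :=
  let cost_tunnels := mstB N edges
  let edges2 := edges ++ teleporters.map (fun t => [pg t 0 - 1, N, pg t 1])
  let cost_with_teleporters := mstB (N + 1) edges2
  min cost_tunnels cost_with_teleporters

-- ===== PRECONDITION & SPEC =====
-- a well-formed tunnel edge: a triple with both endpoints in [0, N)
def validRowB (V : Int) (row : List Int) : Bool :=
  (row.length == 3) && decide (0 ≤ pg row 0) && decide (pg row 0 < V) &&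
  decide (0 ≤ pg row 1) && decide (pg row 1 < V)

-- one BFS-style growth pass of the reachable-from-0 set along the edge list
def pvGrow (edges : List (List Int)) (S : List Int) : List Int :=
  edges.foldl (fun S row =>
    if pg row 0 ∈ S ∧ pg row 1 ∉ S then S ++ [pg row 1]
    else if pg row 1 ∈ S ∧ pg row 0 ∉ S then S ++ [pg row 0] else S) S

-- the tunnel graph on vertices 0..N-1 is connected (N growth passes reach a fixpoint)
def pvConnected (N : Int) (edges : List (List Int)) : Bool :=
  let S := (List.range N.toNat).foldl (fun S _ => pvGrow edges S) [0]
  (PySem.List.pyRange 0 N 1).all (fun v => decide (v ∈ S))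

-- Pre_ is where Python A returns normally: teleporter rows are pairs, and either the
-- degenerate case N ≤ 0 (both Kruskal loops are vacuous; rows only need a sort key at
-- index 2), or N ≥ 1 with well-formed edge triples whose endpoints lie in [0,N),
-- teleporter nodes in [1,N], at least one teleporter, and a connected tunnel graph.
-- Excluded inputs on which A still returns are only malformed ones outside the task's
-- natural domain (negative endpoints hitting Python's index wraparound, or out-of-range
-- rows past the point where A's loop happens to stop early) — see the claim's cites.
def Pre_solve (N : Int) (K : Int) (M : Int) (teleporters : List (List Int)) (edges : List (List Int)) : Prop :=
  (∀ t ∈ teleporters, t.length = 2) ∧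
  ((N ≤ 0 ∧ ∀ row ∈ edges, 3 ≤ row.length) ∨
   (1 ≤ N ∧ teleporters ≠ [] ∧
    (∀ row ∈ edges, validRowB N row = true) ∧
    (∀ t ∈ teleporters, 1 ≤ pg t 0 ∧ pg t 0 ≤ N) ∧
    pvConnected N edges = true))
instance (N : Int) (K : Int) (M : Int) (teleporters : List (List Int)) (edges : List (List Int)) : Decidable (Pre_solve N K M teleporters edges) := by unfold Pre_solve; infer_instance

def pvWitness_solve : Int × Int × Int × List (List Int) × List (List Int) :=
  (2, 1, 1, [[1, 7]], [[0, 1, 3]])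

def Spec_solve (N : Int) (K : Int) (M : Int) (teleporters : List (List Int)) (edges : List (List Int)) (out : Int) : Prop := out = solve_alt N K M teleporters edges
instance (N : Int) (K : Int) (M : Int) (teleporters : List (List Int)) (edges : List (List Int)) (out : Int) : Decidable (Spec_solve N K M teleporters edges out) := by unfold Spec_solve; infer_instance

-- ===== CLAIM (what is proved, stated in full; the proofs are below) =====
def Claim_equal_solve : Prop := ∀ (N : Int) (K : Int) (M : Int) (teleporters : List (List Int)) (edges : List (List Int)), Dom_solve N K M teleporters edges → Pre_solve N K M teleporters edges → Spec_solve N K M teleporters edges (solve N K M teleporters edges)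

-- ===== LEMMAS AND PROOFS =====

-- parent[j] → parent[parent[j]] → … reaches root r in exactly n steps
inductive Chain (parent : List Int) : Nat → Int → Int → Prop
  | zero (j : Int) (h : pg parent j = j) : Chain parent 0 j j
  | succ (n : Nat) (j r : Int) (hne : pg parent j ≠ j)
      (hc : Chain parent n (pg parent j) r) : Chain parent (n + 1) j r

lemma chain_fix {parent : List Int} {n : Nat} {j r : Int} (h : Chain parent n j r) :
    pg parent r = r := by
  induction h with
  | zero j h => exact h
  | succ n j r hne hc ih => exact ih

lemma findA_eq {parent : List Int} {n : Nat} {j r : Int} (h : Chain parent n j r) :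
    ∀ F : Nat, n < F → findA parent j F = r := by
  induction h with
  | zero j h =>
    intro F hF
    match F, hF with
    | m + 1, _ => simp [findA, h]
  | succ n j r hne hc ih =>
    intro F hF
    match F, hF with
    | m + 1, hF => simp only [findA, if_neg hne]; exact ih m (by omega)

-- reading after writing one cell, all indices nonnegative and in range
lemma pg_set {l : List Int} {x j : Int} (y : Int) (hx0 : 0 ≤ x) (hxl : x < (l.length : Int))
    (hj0 : 0 ≤ j) (hjl : j < (l.length : Int)) :
    pg (PySem.List.pySetD l x y) j = if j = x then y else pg l j := by
  simp only [pg]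
  rw [PySem.List.pySetD_of_nonneg l y hx0,
      PySem.List.pyGetD_eq_getElem _ (0:Int) hj0 (by simp [List.length_set]; omega),
      PySem.List.pyGetD_eq_getElem l (0:Int) hj0 (by omega),
      List.getElem_set]
  by_cases h : j = x
  · simp [h]
  · have hne : x.toNat ≠ j.toNat := by omega
    simp [h, hne]

-- after parent[x] := y (x, y distinct roots), every chain re-roots x to y, one step longer at most
lemma chain_update {parent : List Int} {x y : Int}
    (hx0 : 0 ≤ x) (hxl : x < (parent.length : Int)) (hy0 : 0 ≤ y) (hyl : y < (parent.length : Int))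
    (hxy : x ≠ y) (hrx : pg parent x = x) (hry : pg parent y = y)
    (hpr : ∀ j : Int, 0 ≤ j → j < (parent.length : Int) → 0 ≤ pg parent j ∧ pg parent j < (parent.length : Int)) :
    ∀ {n : Nat} {j r : Int}, 0 ≤ j → j < (parent.length : Int) → Chain parent n j r →
    ∃ m ≤ n + 1, Chain (PySem.List.pySetD parent x y) m j (if r = x then y else r) := by
  intro n j r hj0 hjl hc
  induction hc with
  | zero j h =>
    by_cases hjx : j = x
    · subst hjx
      refine ⟨1, by omega, ?_⟩
      have h1 : pg (PySem.List.pySetD parent j y) j = y := by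
        rw [pg_set y hx0 hxl hj0 hjl]; simp
      have h2 : pg (PySem.List.pySetD parent j y) y = y := by
        rw [pg_set y hx0 hxl hy0 hyl]; simp [Ne.symm hxy, hry]
      rw [if_pos rfl]
      exact Chain.succ 0 j y (by rw [h1]; exact Ne.symm hxy) (by rw [h1]; exact Chain.zero y h2)
    · refine ⟨0, by omega, ?_⟩
      have h1 : pg (PySem.List.pySetD parent x y) j = j := by
        rw [pg_set y hx0 hxl hj0 hjl]; simp [hjx, h]
      simp only [if_neg hjx]
      exact Chain.zero j h1
  | succ n j r hne hcn ih =>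
    have hjx : j ≠ x := fun h => hne (by rw [h]; exact hrx)
    have hp := hpr j hj0 hjl
    obtain ⟨m, hm, hc'⟩ := ih hp.1 hp.2
    have h1 : pg (PySem.List.pySetD parent x y) j = pg parent j := by
      rw [pg_set y hx0 hxl hj0 hjl]; simp [hjx]
    refine ⟨m + 1, by omega, ?_⟩
    exact Chain.succ m j _ (by rw [h1]; exact hne) (by rw [h1]; exact hc')

-- the loop invariant tying A's union-find forest to B's label array:
-- rt is the root map of the forest, φ translates roots to B's labels (injectively)
structure KInv (V : Int) (parent comp : List Int) (e : Int) (b : Nat) (rt φ : Int → Int) : Prop where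
  hpl : parent.length = V.toNat
  hcl : comp.length = V.toNat
  hpr : ∀ j : Int, 0 ≤ j → j < V → 0 ≤ pg parent j ∧ pg parent j < V
  hchain : ∀ j : Int, 0 ≤ j → j < V → ∃ n ≤ b, Chain parent n j (rt j)
  hrtr : ∀ j : Int, 0 ≤ j → j < V → 0 ≤ rt j ∧ rt j < V
  hphi : ∀ j : Int, 0 ≤ j → j < V → pg comp j = φ (rt j)
  hinj : ∀ j k : Int, 0 ≤ j → j < V → 0 ≤ k → k < V → φ (rt j) = φ (rt k) → rt j = rt k
  hcard : e + (comp.toFinset.card : Int) = V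

lemma pg_mem {l : List Int} {j : Int} (hj0 : 0 ≤ j) (hjl : j < (l.length : Int)) :
    pg l j ∈ l := by
  have h : PySem.Raise.InRange l.length j := by unfold PySem.Raise.InRange; omega
  show PySem.List.pyGetD l j 0 ∈ l
  exact PySem.List.pyGetD_mem l 0 h

lemma card_merge {comp : List Int} {cu cv : Int} (hcu : cu ∈ comp) (hcv : cv ∈ comp)
    (hne : cu ≠ cv) :
    (comp.map (fun c => if c = cv then cu else c)).toFinset.card + 1 = comp.toFinset.card := by
  have himg : (comp.map (fun c => if c = cv then cu else c)).toFinset = comp.toFinset.erase cv := by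
    ext a
    simp only [List.mem_toFinset, List.mem_map, Finset.mem_erase]
    constructor
    · rintro ⟨b, hb, hfb⟩
      subst hfb
      by_cases hbv : b = cv
      · subst hbv; rw [if_pos rfl]; exact ⟨hne, hcu⟩
      · simp only [if_neg hbv]; exact ⟨hbv, hb⟩
    · rintro ⟨hav, ha⟩
      exact ⟨a, ha, by rw [if_neg hav]⟩
  rw [himg, Finset.card_erase_of_mem (by simpa using hcv)]
  have : 0 < comp.toFinset.card := Finset.card_pos.mpr ⟨cv, by simpa using hcv⟩
  omega

lemma pg_map_merge {comp : List Int} {j cu cv : Int} (hj0 : 0 ≤ j) (hjl : j < (comp.length : Int)) :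
    pg (comp.map (fun c => if c = cv then cu else c)) j
      = if pg comp j = cv then cu else pg comp j := by
  simp only [pg]
  rw [PySem.List.pyGetD_eq_getElem _ (0:Int) hj0 (by simp; omega),
      PySem.List.pyGetD_eq_getElem comp (0:Int) hj0 (by omega)]
  simp

-- the union step: A redirects root x to root y, B relabels cv to cu; the invariant survives
lemma inv_union {V : Int} {parent comp : List Int} {e : Int} {b : Nat} {rt φ : Int → Int}
    (inv : KInv V parent comp e b rt φ) {u v : Int}
    (hu0 : 0 ≤ u) (huV : u < V) (hv0 : 0 ≤ v) (hvV : v < V)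
    (hne : rt u ≠ rt v) {x y : Int}
    (hxy : (x = rt u ∧ y = rt v) ∨ (x = rt v ∧ y = rt u)) :
    KInv V (PySem.List.pySetD parent x y)
      (comp.map (fun c => if c = pg comp v then pg comp u else c)) (e + 1) (b + 1)
      (fun j => if rt j = x then y else rt j)
      (fun r => if r = y then pg comp u else φ r) := by
  obtain ⟨hpl, hcl, hpr, hchain, hrtr, hphi, hinj, hcard⟩ := inv
  have hVnn : (0:Int) ≤ V := le_of_lt (lt_of_le_of_lt hu0 huV)
  have hrootu : pg parent (rt u) = rt u := by
    obtain ⟨n, _, hc⟩ := hchain u hu0 huV; exact chain_fix hc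
  have hrootv : pg parent (rt v) = rt v := by
    obtain ⟨n, _, hc⟩ := hchain v hv0 hvV; exact chain_fix hc
  have hxr : 0 ≤ x ∧ x < V := by
    rcases hxy with ⟨h, _⟩ | ⟨h, _⟩
    · rw [h]; exact hrtr u hu0 huV
    · rw [h]; exact hrtr v hv0 hvV
  have hyr : 0 ≤ y ∧ y < V := by
    rcases hxy with ⟨_, h⟩ | ⟨_, h⟩
    · rw [h]; exact hrtr v hv0 hvV
    · rw [h]; exact hrtr u hu0 huV
  have hxyne : x ≠ y := by
    rcases hxy with ⟨h1, h2⟩ | ⟨h1, h2⟩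
    · rw [h1, h2]; exact hne
    · rw [h1, h2]; exact Ne.symm hne
  have hrx : pg parent x = x := by
    rcases hxy with ⟨h, _⟩ | ⟨h, _⟩
    · rw [h]; exact hrootu
    · rw [h]; exact hrootv
  have hry : pg parent y = y := by
    rcases hxy with ⟨_, h⟩ | ⟨_, h⟩
    · rw [h]; exact hrootv
    · rw [h]; exact hrootu
  have hpr' : ∀ j : Int, 0 ≤ j → j < (parent.length : Int) →
      0 ≤ pg parent j ∧ pg parent j < (parent.length : Int) := by
    intro j hj0 hjl
    have hl : (parent.length : Int) = V := by rw [hpl]; omega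
    rw [hl] at hjl ⊢
    exact hpr j hj0 hjl
  have hcucv : pg comp u ≠ pg comp v := by
    intro h
    exact hne (hinj u v hu0 huV hv0 hvV (by rw [← hphi u hu0 huV, ← hphi v hv0 hvV]; exact h))
  -- label of j equals pg comp v iff root of j is rt v (and same for u)
  have hlblv : ∀ j : Int, 0 ≤ j → j < V → (pg comp j = pg comp v ↔ rt j = rt v) := by
    intro j hj0 hjV
    constructor
    · intro h
      exact hinj j v hj0 hjV hv0 hvV (by rw [← hphi j hj0 hjV, ← hphi v hv0 hvV]; exact h)
    · intro h; rw [hphi j hj0 hjV, h, ← hphi v hv0 hvV]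
  have hlblu : ∀ j : Int, 0 ≤ j → j < V → (pg comp j = pg comp u ↔ rt j = rt u) := by
    intro j hj0 hjV
    constructor
    · intro h
      exact hinj j u hj0 hjV hu0 huV (by rw [← hphi j hj0 hjV, ← hphi u hu0 huV]; exact h)
    · intro h; rw [hphi j hj0 hjV, h, ← hphi u hu0 huV]
  refine ⟨?_, ?_, ?_, ?_, ?_, ?_, ?_, ?_⟩
  · rw [PySem.List.length_pySetD, hpl]
  · rw [List.length_map, hcl]
  · intro j hj0 hjV
    rw [pg_set y hxr.1 (by omega) hj0 (by omega)]
    by_cases h : j = x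
    · simp only [if_pos h]; omega
    · simp only [if_neg h]; exact hpr j hj0 hjV
  · intro j hj0 hjV
    obtain ⟨n, hn, hc⟩ := hchain j hj0 hjV
    obtain ⟨m, hm, hc'⟩ := chain_update hxr.1 (by omega) hyr.1 (by omega) hxyne hrx hry hpr'
      hj0 (by omega) hc
    exact ⟨m, by omega, hc'⟩
  · intro j hj0 hjV
    by_cases h : rt j = x
    · simp only [if_pos h]; omega
    · simp only [if_neg h]; exact hrtr j hj0 hjV
  · intro j hj0 hjV
    rw [pg_map_merge hj0 (by rw [hcl]; omega)]
    by_cases h : rt j = x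
    · have hx_uv : pg comp j = pg comp u ∨ pg comp j = pg comp v := by
        rcases hxy with ⟨h1, _⟩ | ⟨h1, _⟩
        · exact Or.inl ((hlblu j hj0 hjV).mpr (by rw [h]; exact h1))
        · exact Or.inr ((hlblv j hj0 hjV).mpr (by rw [h]; exact h1))
      simp only [if_pos h, if_true]
      rcases hx_uv with h2 | h2
      · rw [if_neg (by rw [h2]; exact hcucv)]; exact h2
      · rw [if_pos h2]
    · simp only [if_neg h]
      by_cases h2 : rt j = y
      · have hy_uv : pg comp j = pg comp u ∨ pg comp j = pg comp v := by
          rcases hxy with ⟨_, h1⟩ | ⟨_, h1⟩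
          · exact Or.inr ((hlblv j hj0 hjV).mpr (by rw [h2]; exact h1))
          · exact Or.inl ((hlblu j hj0 hjV).mpr (by rw [h2]; exact h1))
        simp only [if_pos h2]
        rcases hy_uv with h3 | h3
        · rw [if_neg (by rw [h3]; exact hcucv)]; exact h3
        · rw [if_pos h3]
      · have h3 : pg comp j ≠ pg comp v := by
          intro hcon
          have hrj := (hlblv j hj0 hjV).mp hcon
          rcases hxy with ⟨_, h1⟩ | ⟨h1, _⟩
          · exact h2 (by rw [hrj]; exact h1.symm)
          · exact h (by rw [hrj]; exact h1.symm)
        rw [if_neg h3, if_neg h2]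
        exact hphi j hj0 hjV
  · intro j k hj0 hjV hk0 hkV
    -- rt u and rt v are exactly {x, y}
    have hmemu : rt u = x ∨ rt u = y := by
      rcases hxy with ⟨h1, _⟩ | ⟨_, h1⟩
      · exact Or.inl h1.symm
      · exact Or.inr h1.symm
    by_cases h1 : rt j = x <;> by_cases h2 : rt k = x
    · simp only [if_pos h1, if_pos h2]; intro _; trivial

    · simp only [if_pos h1, if_neg h2]
      simp only [if_true]
      intro hφ
      by_cases h3 : rt k = y
      · exact h3.symm
      · rw [if_neg h3] at hφ
        have h4 : pg comp k = pg comp u := by rw [hphi k hk0 hkV, ← hφ]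
        have h5 := (hlblu k hk0 hkV).mp h4
        rcases hmemu with h6 | h6
        · exact absurd (by rw [h5]; exact h6) h2
        · exact absurd (by rw [h5]; exact h6) h3
    · simp only [if_pos h2, if_neg h1]
      simp only [if_true]
      intro hφ
      by_cases h3 : rt j = y
      · exact h3
      · rw [if_neg h3] at hφ
        have h4 : pg comp j = pg comp u := by rw [hphi j hj0 hjV, hφ]
        have h5 := (hlblu j hj0 hjV).mp h4
        rcases hmemu with h6 | h6
        · exact absurd (by rw [h5]; exact h6) h1
        · exact absurd (by rw [h5]; exact h6) h3
    · simp only [if_neg h1, if_neg h2]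
      by_cases h3 : rt j = y <;> by_cases h4 : rt k = y
      · rw [h3, h4]; intro _; rfl
      · rw [if_pos h3, if_neg h4]
        intro hφ
        have h5 : pg comp k = pg comp u := by rw [hphi k hk0 hkV, ← hφ]
        have h6 := (hlblu k hk0 hkV).mp h5
        rcases hmemu with h7 | h7
        · exact absurd (by rw [h6]; exact h7) h2
        · exact absurd (by rw [h6]; exact h7) h4
      · rw [if_pos h4, if_neg h3]
        intro hφ
        have h5 : pg comp j = pg comp u := by rw [hphi j hj0 hjV, hφ]
        have h6 := (hlblu j hj0 hjV).mp h5
        rcases hmemu with h7 | h7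
        · exact absurd (by rw [h6]; exact h7) h1
        · exact absurd (by rw [h6]; exact h7) h3
      · rw [if_neg h3, if_neg h4]
        intro hφ
        exact hinj j k hj0 hjV hk0 hkV hφ
  · have hmem_u : pg comp u ∈ comp := pg_mem hu0 (by rw [hcl]; omega)
    have hmem_v : pg comp v ∈ comp := pg_mem hv0 (by rw [hcl]; omega)
    have := card_merge hmem_u hmem_v hcucv
    omega

lemma mstGo_const {V : Int} {comp : List Int} {total : Int} {a : Int}
    (hcl : comp.length = V.toNat)
    (hall : ∀ c ∈ comp, c = a) :
    ∀ rows : List (List Int), (∀ row ∈ rows, validRowB V row = true) →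
    mstGo comp total rows = total := by
  intro rows hv
  induction rows with
  | nil => rfl
  | cons row rest ih =>
    have hrow := hv row (by simp)
    simp only [validRowB, Bool.and_eq_true, decide_eq_true_eq, beq_iff_eq] at hrow
    have hVpos : 0 < V := lt_of_le_of_lt hrow.1.1.1.2 hrow.1.1.2
    have hu : pg comp (pg row 0) ∈ comp := pg_mem hrow.1.1.1.2 (by rw [hcl]; omega)
    have hvm : pg comp (pg row 1) ∈ comp := pg_mem hrow.1.2 (by rw [hcl]; omega)
    have : pg comp (pg row 0) = pg comp (pg row 1) := by
      rw [hall _ hu, hall _ hvm]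
    have hcond : ¬ (pg comp (pg row 0) ≠ pg comp (pg row 1)) := by simp [this]
    simp only [mstGo]
    rw [if_neg hcond]
    exact ih (fun r hr => hv r (by simp [hr]))

-- the joint induction: A's while-loop result (summed) equals B's fold, under the invariant
lemma go_eq {V : Int} (hV : 1 ≤ V) (F : Nat) :
    ∀ (rows : List (List Int)) (parent rank comp : List Int) (e total : Int)
      (res : List (List Int)) (b : Nat) (rt φ : Int → Int),
      KInv V parent comp e b rt φ →
      res.foldl (fun acc row => acc + pg row 2) 0 = total →
      (∀ row ∈ rows, validRowB V row = true) →
      b + rows.length < F →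
      (kruskalGo V F parent rank e res rows).foldl (fun acc row => acc + pg row 2) 0
        = mstGo comp total rows := by
  intro rows
  induction rows with
  | nil =>
    intro parent rank comp e total res b rt φ inv hacc hv hb
    simpa [kruskalGo, mstGo] using hacc
  | cons row rest ih =>
    intro parent rank comp e total res b rt φ inv hacc hv hb
    have hrow := hv row (by simp)
    simp only [validRowB, Bool.and_eq_true, decide_eq_true_eq, beq_iff_eq] at hrow
    obtain ⟨⟨⟨⟨hlen3, hu0⟩, huV⟩, hv0⟩, hvV⟩ := hrow
    have hbF : b < F := by simp at hb; omega
    have hfu : findA parent (pg row 0) F = rt (pg row 0) := by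
      obtain ⟨n, hn, hc⟩ := inv.hchain _ hu0 huV
      exact findA_eq hc F (by omega)
    have hfv : findA parent (pg row 1) F = rt (pg row 1) := by
      obtain ⟨n, hn, hc⟩ := inv.hchain _ hv0 hvV
      exact findA_eq hc F (by omega)
    have hlbl : (pg comp (pg row 0) = pg comp (pg row 1)) ↔ (rt (pg row 0) = rt (pg row 1)) := by
      constructor
      · intro h
        exact inv.hinj _ _ hu0 huV hv0 hvV
          (by rw [← inv.hphi _ hu0 huV, ← inv.hphi _ hv0 hvV, h])
      · intro h
        rw [inv.hphi _ hu0 huV, h, ← inv.hphi _ hv0 hvV]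
    by_cases he : e < V - 1
    · by_cases hroots : rt (pg row 0) = rt (pg row 1)
      · -- rejected edge: both sides skip
        have hn1 : ¬ (rt (pg row 0) ≠ rt (pg row 1)) := by simpa using hroots
        have hn2 : ¬ (pg comp (pg row 0) ≠ pg comp (pg row 1)) := by
          simpa using hlbl.mpr hroots
        rw [kruskalGo, mstGo]
        simp only [if_pos he, hfu, hfv]
        rw [if_neg hn1, if_neg hn2]
        exact ih parent rank comp e total res b rt φ inv hacc
          (fun r hr => hv r (by simp [hr])) (by simp at hb ⊢; omega)
      · -- accepted edge
        have hrootu : pg parent (rt (pg row 0)) = rt (pg row 0) := by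
          obtain ⟨n, _, hc⟩ := inv.hchain _ hu0 huV; exact chain_fix hc
        have hrootv : pg parent (rt (pg row 1)) = rt (pg row 1) := by
          obtain ⟨n, _, hc⟩ := inv.hchain _ hv0 hvV; exact chain_fix hc
        have hfx : findA parent (rt (pg row 0)) F = rt (pg row 0) :=
          findA_eq (Chain.zero _ hrootu) F (by omega)
        have hfy : findA parent (rt (pg row 1)) F = rt (pg row 1) :=
          findA_eq (Chain.zero _ hrootv) F (by omega)
        have hacc' : (res ++ [[pg row 0, pg row 1, pg row 2]]).foldl
            (fun acc row => acc + pg row 2) 0 = total + pg row 2 := by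
          rw [List.foldl_append, hacc]
          rfl
        have hb' : (b + 1) + rest.length < F := by simp at hb; omega
        have hv' : ∀ r ∈ rest, validRowB V r = true := fun r hr => hv r (by simp [hr])
        have hp2 : pg comp (pg row 0) ≠ pg comp (pg row 1) := fun h => hroots (hlbl.mp h)
        rw [kruskalGo, mstGo]
        simp only [if_pos he, hfu, hfv]
        rw [if_pos hroots, if_pos hp2]
        simp only [unionA, hfx, hfy]
        split_ifs with h1 h2
        · exact ih _ rank _ (e+1) (total + pg row 2) _ (b+1) _ _
            (inv_union inv hu0 huV hv0 hvV hroots (Or.inl ⟨rfl, rfl⟩)) hacc' hv' hb'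
        · exact ih _ rank _ (e+1) (total + pg row 2) _ (b+1) _ _
            (inv_union inv hu0 huV hv0 hvV hroots (Or.inr ⟨rfl, rfl⟩)) hacc' hv' hb'
        · exact ih _ _ _ (e+1) (total + pg row 2) _ (b+1) _ _
            (inv_union inv hu0 huV hv0 hvV hroots (Or.inr ⟨rfl, rfl⟩)) hacc' hv' hb'
    · -- A's loop has finished (e = V - 1): every vertex shares one label, B only skips
      have hcl := inv.hcl
      have hone : comp.toFinset.card = 1 := by
        have hcard := inv.hcard
        have hpos : 0 < comp.toFinset.card := by
          apply Finset.card_pos.mpr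
          have hne : comp ≠ [] := by
            intro h; rw [h] at hcl; simp at hcl; omega
          exact ⟨comp.head hne, List.mem_toFinset.mpr (List.head_mem hne)⟩
        omega
      obtain ⟨a, ha⟩ := Finset.card_eq_one.mp hone
      have hall : ∀ c ∈ comp, c = a := by
        intro c hc
        have : c ∈ comp.toFinset := by simpa using hc
        rw [ha] at this; simpa using this
      rw [kruskalGo, if_neg he, hacc]
      exact (mstGo_const hcl hall (row :: rest) hv).symm

-- with fewer than two vertices A's while-loop is vacuous
lemma kruskalA_of_le_one {V : Int} (hV : V ≤ 1) (g : List (List Int)) :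
    kruskalA V g = 0 := by
  rw [kruskalA]
  cases PySem.List.sorted g (fun row => pg row 2) false with
  | nil => rfl
  | cons row rest => rw [kruskalGo, if_neg (by omega)]; rfl

-- both MST routines, run on the same vertex count and edge list, agree
lemma kruskal_eq_mst {V : Int} (hV : 1 ≤ V) (g : List (List Int))
    (hvalid : ∀ row ∈ g, validRowB V row = true) :
    kruskalA V g = mstB V g := by
  by_cases hV1 : V ≤ 1
  · exact (kruskalA_of_le_one hV1 g).trans (by rw [mstB, if_pos hV1])
  rw [kruskalA, mstB, if_neg hV1]
  have hlen : (PySem.List.pyRange 0 V 1).length = V.toNat := by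
    rw [PySem.List.length_pyRange_one]; omega
  have hpg : ∀ j : Int, 0 ≤ j → j < V → pg (PySem.List.pyRange 0 V 1) j = j := by
    intro j hj0 hjV
    simp only [pg]
    rw [PySem.List.pyGetD_eq_getElem _ (0:Int) hj0 (by rw [hlen]; omega),
        PySem.List.getElem_pyRange_one]
    omega
  have hnd := PySem.List.nodup_pyRange_one (a := 0) (b := V)
  have inv0 : KInv V (PySem.List.pyRange 0 V 1) (PySem.List.pyRange 0 V 1) 0 0
      (fun j => j) (fun r => r) := by
    refine ⟨hlen, hlen, ?_, ?_, ?_, ?_, ?_, ?_⟩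
    · intro j hj0 hjV; rw [hpg j hj0 hjV]; exact ⟨hj0, hjV⟩
    · intro j hj0 hjV; exact ⟨0, le_refl 0, Chain.zero j (hpg j hj0 hjV)⟩
    · intro j hj0 hjV; exact ⟨hj0, hjV⟩
    · intro j hj0 hjV; exact hpg j hj0 hjV
    · intro j k _ _ _ _ h; exact h
    · rw [List.toFinset_card_of_nodup hnd, hlen]; omega
  have hvs : ∀ row ∈ PySem.List.sorted g (fun row => pg row 2) false, validRowB V row = true := by
    intro row hr
    exact hvalid row ((PySem.List.mem_sorted _ _ _ _).mp hr)
  exact go_eq hV _ _ _ _ _ 0 0 [] 0 (fun j => j) (fun r => r) inv0 rfl hvs (by omega)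

-- a row well-formed for N vertices is well-formed for N + 1
lemma validRowB_mono {N : Int} {row : List Int} (h : validRowB N row = true) :
    validRowB (N + 1) row = true := by
  simp only [validRowB, Bool.and_eq_true, decide_eq_true_eq, beq_iff_eq] at h ⊢
  omega

-- ===== VERDICT (by name: the statement is the Claim_ definition above) =====
theorem solve_spec : Claim_equal_solve := by
  unfold Claim_equal_solve
  intro N K M teleporters edges _ hpre
  obtain ⟨htl2, hcase⟩ := hpre
  unfold Spec_solve solve solve_alt
  rcases hcase with ⟨hN0, _⟩ | ⟨hN, _, hedges, htel, _⟩
  · -- N ≤ 0: both Kruskal runs are vacuous on both sides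
    have a1 : N ≤ 1 := by omega
    have a2 : N + 1 ≤ 1 := by omega
    simp only [kruskalA_of_le_one a1, kruskalA_of_le_one a2, mstB, if_pos a1, if_pos a2]
    simp
  · have h1 : kruskalA N edges = mstB N edges := kruskal_eq_mst hN edges hedges
    have h2 : ∀ row ∈ edges ++ teleporters.map (fun t => [pg t 0 - 1, N, pg t 1]),
        validRowB (N + 1) row = true := by
      intro row hr
      rcases List.mem_append.mp hr with h | h
      · exact validRowB_mono (hedges row h)
      · obtain ⟨t, ht, rfl⟩ := List.mem_map.mp h
        obtain ⟨ht1, ht2⟩ := htel t ht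
        simp only [validRowB, Bool.and_eq_true, decide_eq_true_eq, beq_iff_eq]
        have e0 : pg [pg t 0 - 1, N, pg t 1] 0 = pg t 0 - 1 := rfl
        have e1 : pg [pg t 0 - 1, N, pg t 1] 1 = N := rfl
        rw [e0, e1]
        exact ⟨⟨⟨⟨rfl, by omega⟩, by omega⟩, by omega⟩, by omega⟩
    have h3 : kruskalA (N + 1) (edges ++ teleporters.map (fun t => [pg t 0 - 1, N, pg t 1]))
        = mstB (N + 1) (edges ++ teleporters.map (fun t => [pg t 0 - 1, N, pg t 1])) :=
      kruskal_eq_mst (by omega) _ h2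
    simp only [h1, h3]
    rw [min_def]
    split_ifs <;> omega
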